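-- pv_equiv track=rewrite | github.com/shubh0125/Sudoku-Solver | 16x16.py | solve
-- ===== SOURCE A (Python) =====
-- def solve(b):
--     find = find_empty(b)
--     if not find:
--         return True
--     else:
--         row, col = find
--
--     for i in range(1, 17):
--         if valid(b, i, (row, col)):
--             b[row][col] = i
--
--             if solve(b):
--                 return True
--
--             b[row][col] = 0
--
--     return False
--
-- def valid(b, num, pos):
--     for i in range(len(b[0])):
--         if b[pos[0]][i] == num and pos[1] != i:
--             return False
--
--     for i in range(len(b)):
--         if b[i][pos[1]] == num and pos[0] != i:
--             return False
--
--     x0 = pos[1] // 4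
--     y0 = pos[0] // 4
--
--     for i in range(y0 * 4, y0 * 4 + 4):
--         for j in range(x0 * 4, x0 * 4 + 4):
--             if b[i][j] == num and (i, j) != pos:
--                 return False
--
--     return True
--
-- def find_empty(b):
--     for i in range(len(b)):
--         for j in range(len(b[0])):
--             if b[i][j] == 0:
--                 return i, j
--
--     return None
-- ===== SOURCE B (Python) =====
-- # Iterative "odometer" backtracker: no recursion -- the DFS stack is encoded in
-- # the board itself (the resume value at a cell is its current content + 1); the
-- # empty cells and each cell's peer list are precomputed once.  Fills b in place
-- # on success and restores the zeros on failure, exactly like the original.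
--
-- def _peers(r, c):
--     ps = [(r, j) for j in range(16) if j != c]
--     ps += [(i, c) for i in range(16) if i != r]
--     ps += [(i, j) for i in range(r // 4 * 4, r // 4 * 4 + 4)
--            for j in range(c // 4 * 4, c // 4 * 4 + 4) if (i, j) != (r, c)]
--     return ps
--
-- PEERS = [_peers(p // 16, p % 16) for p in range(256)]
--
-- def solve(b):
--     width = len(b[0]) if b else 0
--     empties = [16 * i + j for i in range(len(b)) for j in range(width) if b[i][j] == 0]
--     n = len(empties)
--     idx = 0
--     while 0 <= idx < n:
--         p = empties[idx]
--         r, c = p // 16, p % 16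
--         v = b[r][c] + 1
--         while v <= 16 and any(b[i][j] == v for (i, j) in PEERS[p]):
--             v += 1
--         if v <= 16:
--             b[r][c] = v
--             idx += 1
--         else:
--             b[r][c] = 0
--             idx -= 1
--     return idx == n
-- ===== Notes on version B (the rewrite author's own statement) =====
-- stated objective: alternative
-- what changed: B replaces A's recursive backtracking (with a full-board find_empty rescan and row/col/box rescans at every node) by a non-recursive odometer loop over a once-computed list of empty cells and per-cell peer lists: the DFS stack lives in the board itself (a frame resumes at its cell's current value + 1) and a single while loop pushes/pops an index; Pre_ restricts to 16x16 boards, the function's natural domain, plus boards whose scanned region has no zero (A answers True without searching) -- on other shapes A's behaviour is accidental.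
-- outside the precondition, e.g. on solve([[0, 1, 2, 3], [1, 2, 3, 4], [2, 3, 4, 1], [4, 1, 2, 3]]): A returns True, B raises IndexError
import Mathlib
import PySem

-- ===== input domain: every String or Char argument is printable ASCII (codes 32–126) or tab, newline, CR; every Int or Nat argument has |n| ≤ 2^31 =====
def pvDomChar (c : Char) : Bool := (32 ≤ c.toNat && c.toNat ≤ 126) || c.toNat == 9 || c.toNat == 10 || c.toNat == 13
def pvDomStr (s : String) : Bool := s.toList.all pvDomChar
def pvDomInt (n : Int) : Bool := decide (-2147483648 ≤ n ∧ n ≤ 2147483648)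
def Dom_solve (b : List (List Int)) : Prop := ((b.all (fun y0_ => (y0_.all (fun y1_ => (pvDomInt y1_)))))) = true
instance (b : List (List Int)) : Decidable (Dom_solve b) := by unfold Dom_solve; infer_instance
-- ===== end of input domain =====

-- B replaces A's recursive backtracking by a non-recursive odometer loop over a
-- once-computed list of empty cells with per-cell peer lists (the DFS stack is
-- encoded in the board: a frame resumes at its cell's value + 1); both Pythons
-- mutate the board argument identically, the theorem is about the returned Bool.

-- ===== PORT A =====
-- b[i][j]; the `.getD` defaults are never reached on inputs admitted by Pre_solve
def pyCell (b : List (List Int)) (i j : Int) : Int :=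
  (PySem.List.pyGet? ((PySem.List.pyGet? b i).getD []) j).getD 0

-- inner loop of find_empty: 'for j in range(len(b[0])): if b[i][j] == 0: return j'
def feInner (b : List (List Int)) (i : Int) : List Int → Option Int
  | [] => none
  | j :: js => if pyCell b i j = 0 then some j else feInner b i js

-- outer loop of find_empty
def feOuter (b : List (List Int)) : List Int → Option (Int × Int)
  | [] => none
  | i :: is' =>
    match feInner b i (PySem.List.pyRange 0 ((((PySem.List.pyGet? b 0).getD []).length : Int)) 1) with
    | some j => some (i, j)
    | none => feOuter b is'

def find_empty (b : List (List Int)) : Option (Int × Int) :=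
  feOuter b (PySem.List.pyRange 0 ((b.length : Int)) 1)

def valid (b : List (List Int)) (num : Int) (pos : Int × Int) : Bool :=
  ((PySem.List.pyRange 0 ((((PySem.List.pyGet? b 0).getD []).length : Int)) 1).all fun i =>
      !(pyCell b pos.1 i == num && pos.2 != i)) &&
  ((PySem.List.pyRange 0 ((b.length : Int)) 1).all fun i =>
      !(pyCell b i pos.2 == num && pos.1 != i)) &&
  (let x0 := PySem.Int.floordiv pos.2 4
   let y0 := PySem.Int.floordiv pos.1 4
   (PySem.List.pyRange (y0 * 4) (y0 * 4 + 4) 1).all fun i =>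
     (PySem.List.pyRange (x0 * 4) (x0 * 4 + 4) 1).all fun j =>
       !(pyCell b i j == num && (i, j) != pos))

-- b[i][j] = v; call sites only use non-negative in-range indices under Pre_solve
def setCell (b : List (List Int)) (i j v : Int) : List (List Int) :=
  b.set i.toNat ((b.getD i.toNat []).set j.toNat v)

-- the recursion of A's solve; fuel (#zero cells + 1) is a totality guard only,
-- never exhausted under Pre_solve (each recursive call fills one zero cell)
def solveFuel : Nat → List (List Int) → Bool
  | 0, _ => false
  | f + 1, b =>
    match find_empty b with
    | none => true
    | some (row, col) =>
      (PySem.List.pyRange 1 17 1).any fun i =>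
        valid b i (row, col) && solveFuel f (setCell b row col i)

def solve (b : List (List Int)) : Bool :=
  solveFuel ((b.map fun r => r.count 0).sum + 1) b

-- ===== PORT B =====
-- b[r][c] with Nat indices (in range on every input admitted by Pre_solve)
def cell2 (b : List (List Int)) (r c : Nat) : Int := (b.getD r []).getD c 0

-- _peers(r, c)
def peersB (r c : Nat) : List (Nat × Nat) :=
  ((List.range 16).filter (fun j => j ≠ c)).map (fun j => (r, j)) ++
  ((List.range 16).filter (fun i => i ≠ r)).map (fun i => (i, c)) ++
  (((List.range' (r / 4 * 4) 4).flatMap (fun i =>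
      (List.range' (c / 4 * 4) 4).map (fun j => (i, j)))).filter (fun q => q ≠ (r, c)))

-- PEERS = [_peers(p // 16, p % 16) for p in range(256)]
def peersTable : List (List (Nat × Nat)) :=
  (List.range 256).map (fun p => peersB (p / 16) (p % 16))

-- any(b[i][j] == v for (i, j) in PEERS[p])
def badB (b : List (List Int)) (p : Nat) (v : Int) : Bool :=
  (peersTable.getD p []).any (fun q => cell2 b q.1 q.2 == v)

-- inner 'while v <= 16 and any(...): v += 1' (returns the final v)
def nextVal (b : List (List Int)) (p : Nat) (v : Int) : Int :=
  if h : v ≤ 16 ∧ badB b p v then nextVal b p (v + 1) else v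
termination_by (17 - v).toNat
decreasing_by omega

-- empties = [16*i+j for i in range(len(b)) for j in range(width) if b[i][j] == 0]
def emptiesOf (b : List (List Int)) : List Nat :=
  (List.range b.length).flatMap fun i =>
    ((List.range (if b.isEmpty then 0 else (b.getD 0 []).length)).filter
      (fun j => decide ((b.getD i []).getD j 0 = 0))).map fun j => 16 * i + j

-- b[r][c] = v (the functional reading of B's in-place update)
def setAt (b : List (List Int)) (r c : Nat) (v : Int) : List (List Int) :=
  b.set r ((b.getD r []).set c v)

-- the while loop; fuel is a totality guard, proved never exhausted under Pre_solve
def loopB : Nat → List (List Int) → List Nat → Int → Option Bool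
  | 0, _, _, _ => none
  | f + 1, b, es, idx =>
    if 0 ≤ idx ∧ idx < (es.length : Int) then
      let p := es.getD idx.toNat 0
      let r := p / 16
      let c := p % 16
      let v := nextVal b p (cell2 b r c + 1)
      if v ≤ 16 then loopB f (setAt b r c v) es (idx + 1)
      else loopB f (setAt b r c 0) es (idx - 1)
    else some (idx == (es.length : Int))

def solve_alt (b : List (List Int)) : Bool :=
  (loopB (18 ^ 257) b (emptiesOf b) 0).getD false

-- ===== PRECONDITION & SPEC =====
def Board16 (b : List (List Int)) : Prop :=
  b.length = 16 ∧ ∀ i, i < 16 → (b.getD i []).length = 16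

-- every cell of the region A scans (rows × len(b[0]) columns) exists and is non-zero,
-- so A returns True without ever searching
def ZeroFree (b : List (List Int)) : Prop :=
  ∀ i, i < b.length → (b.getD 0 []).length ≤ (b.getD i []).length ∧
    ∀ j, j < (b.getD 0 []).length → (b.getD i []).getD j 0 ≠ 0

-- Pre_solve admits 16×16 boards (the function's natural domain) and the boards A
-- answers True for without searching; on any other shape A's behaviour is accidental —
-- it raises IndexError, or happens to run a 16-value sudoku on a fragment of the board.
def Pre_solve (b : List (List Int)) : Prop := Board16 b ∨ ZeroFree b
instance (b : List (List Int)) : Decidable (Pre_solve b) := by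
  unfold Pre_solve Board16 ZeroFree; infer_instance

def pvWitness_solve : List (List Int) := List.replicate 16 (List.replicate 16 0)

def Spec_solve (b : List (List Int)) (out : Bool) : Prop := out = solve_alt b
instance (b : List (List Int)) (out : Bool) : Decidable (Spec_solve b out) := by
  unfold Spec_solve; infer_instance

-- ===== CLAIM (what is proved, stated in full; the proofs are below) =====
def Claim_equal_solve : Prop :=
  ∀ (b : List (List Int)), Dom_solve b → Pre_solve b → Spec_solve b (solve b)

-- ===== LEMMAS AND PROOFS =====

-- the Bool "square p is empty", used to characterise both ports' searches
def pz (b : List (List Int)) : Nat → Bool := fun p => decide (cell2 b (p / 16) (p % 16) = 0)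

def firstZero (b : List (List Int)) : Option Nat := (List.range' 0 256).find? (pz b)

-- the common spec of both searches: A's for-loop at frame idx from candidate v,
-- with the restore-to-0 made implicit by passing the unmodified board along
def tryA (n : Nat) (es : List Nat) (b : List (List Int)) (idx : Nat) (v : Int) : Bool :=
  if h17 : 17 ≤ v then false
  else if badB b (es.getD idx 0) v then tryA n es b idx (v + 1)
  else
    (if idx + 1 < n then
       tryA n es (setAt b (es.getD idx 0 / 16) (es.getD idx 0 % 16) v) (idx + 1) 1
     else true)
    || tryA n es b idx (v + 1)
termination_by (n - idx, (17 - v).toNat)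
decreasing_by
  · exact Prod.Lex.right _ (by omega)
  · exact Prod.Lex.left _ _ (by omega)
  · exact Prod.Lex.right _ (by omega)

theorem pyCell_natCast (b : List (List Int)) (r c : Nat) :
    pyCell b (r : Int) (c : Int) = cell2 b r c := by
  simp [pyCell, cell2, PySem.List.pyGet?_natCast, List.getD_eq_getElem?_getD]

theorem setCell_natCast (b : List (List Int)) (r c : Nat) (v : Int) :
    setCell b (r : Int) (c : Int) v = setAt b r c v := by
  simp [setCell, setAt]

theorem cell2_setAt (b : List (List Int)) (r c r' c' : Nat) (v : Int)
    (hpre : Board16 b) (hr : r < 16) (hc : c < 16) :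
    cell2 (setAt b r c v) r' c' = if r = r' ∧ c = c' then v else cell2 b r' c' := by
  obtain ⟨hlen, hrows⟩ := hpre
  have hrb : r < b.length := by omega
  have hcb : c < (b.getD r []).length := by rw [hrows r hr]; omega
  unfold cell2 setAt
  by_cases hrr : r = r'
  · subst hrr
    have hrow : (b.set r ((b.getD r []).set c v)).getD r [] = (b.getD r []).set c v := by
      rw [List.getD_eq_getElem (hn := by simpa using hrb), List.getElem_set, if_pos rfl]
    rw [hrow]
    by_cases hcc : c = c'
    · subst hcc
      rw [List.getD_eq_getElem (hn := by simpa using hcb), List.getElem_set, if_pos rfl,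
        if_pos ⟨rfl, rfl⟩]
    · rw [if_neg (by tauto)]
      simp [List.getD_eq_getElem?_getD, hcc]
  · have hrow : (b.set r ((b.getD r []).set c v)).getD r' [] = b.getD r' [] := by
      simp [List.getD_eq_getElem?_getD, hrr]
    rw [hrow, if_neg (by tauto)]

theorem pre_setAt (b : List (List Int)) (r c : Nat) (v : Int)
    (hpre : Board16 b) : Board16 (setAt b r c v) := by
  obtain ⟨hlen, hrows⟩ := hpre
  refine ⟨by simp [setAt, hlen], ?_⟩
  intro i hi
  unfold setAt
  by_cases hri : r = i
  · subst hri
    have hrb : r < b.length := by omega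
    rw [List.getD_eq_getElem (hn := by simpa using hrb), List.getElem_set, if_pos rfl,
      List.length_set]
    exact hrows r hi
  · have : (b.set r ((b.getD r []).set c v)).getD i [] = b.getD i [] := by
      simp [List.getD_eq_getElem?_getD, hri]
    rw [this]
    exact hrows i hi

-- two 16×16 boards with the same cells are the same list of lists
theorem boards_eq (b1 b2 : List (List Int)) (h1 : Board16 b1) (h2 : Board16 b2)
    (h : ∀ i j, i < 16 → j < 16 → cell2 b1 i j = cell2 b2 i j) : b1 = b2 := by
  have hl : b1.length = b2.length := by rw [h1.1, h2.1]
  apply List.ext_getElem hl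
  intro i hi1 hi2
  have hi : i < 16 := by rw [h1.1] at hi1; exact hi1
  have r1 : b1.getD i [] = b1[i] := List.getD_eq_getElem _ _ hi1
  have r2 : b2.getD i [] = b2[i] := List.getD_eq_getElem _ _ hi2
  apply List.ext_getElem
  · rw [← r1, ← r2, h1.2 i hi, h2.2 i hi]
  · intro j hj1 hj2
    have hj : j < 16 := by
      have := h1.2 i hi
      rw [r1] at this
      omega
    have hc := h i j hi hj
    unfold cell2 at hc
    rw [r1, r2, List.getD_eq_getElem _ _ hj1, List.getD_eq_getElem _ _ hj2] at hc
    exact hc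

theorem mem_peersB_lt (r c : Nat) (hr : r < 16) (hc : c < 16) :
    ∀ q ∈ peersB r c, q.1 < 16 ∧ q.2 < 16 ∧ q ≠ (r, c) ∧
      (q.1 = r ∨ q.2 = c ∨
        (r / 4 * 4 ≤ q.1 ∧ q.1 < r / 4 * 4 + 4 ∧ c / 4 * 4 ≤ q.2 ∧ q.2 < c / 4 * 4 + 4)) := by
  intro q hq
  unfold peersB at hq
  simp only [List.mem_append, List.mem_map, List.mem_filter, List.mem_range,
    List.mem_flatMap, List.mem_range'_1, decide_eq_true_eq] at hq
  rcases hq with (⟨j, ⟨hj, hjc⟩, rfl⟩ | ⟨i, ⟨hi, hir⟩, rfl⟩) | ⟨⟨i, ⟨hi1, hi2⟩, j, hj, rfl⟩, hne⟩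
  · exact ⟨hr, hj, by simp [Prod.mk.injEq, hjc], Or.inl rfl⟩
  · exact ⟨hi, hc, by simp [Prod.mk.injEq, hir], Or.inr (Or.inl rfl)⟩
  · exact ⟨by omega, by omega, hne, Or.inr (Or.inr ⟨hi1, by omega, hj.1, hj.2⟩)⟩

-- membership of a row / column / box peer, used to instantiate the peer scan
theorem row_mem_peersB (r c j : Nat) (hj : j < 16) (hjc : j ≠ c) : (r, j) ∈ peersB r c := by
  unfold peersB
  simp only [List.mem_append, List.mem_map, List.mem_filter, List.mem_range, decide_eq_true_eq]
  exact Or.inl (Or.inl ⟨j, ⟨hj, hjc⟩, rfl⟩)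

theorem col_mem_peersB (r c i : Nat) (hi : i < 16) (hir : i ≠ r) : (i, c) ∈ peersB r c := by
  unfold peersB
  simp only [List.mem_append, List.mem_map, List.mem_filter, List.mem_range, decide_eq_true_eq]
  exact Or.inl (Or.inr ⟨i, ⟨hi, hir⟩, rfl⟩)

theorem box_mem_peersB (r c i j : Nat) (hi1 : r / 4 * 4 ≤ i) (hi2 : i < r / 4 * 4 + 4)
    (hj1 : c / 4 * 4 ≤ j) (hj2 : j < c / 4 * 4 + 4) (hne : (i, j) ≠ (r, c)) :
    (i, j) ∈ peersB r c := by
  unfold peersB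
  simp only [List.mem_append, List.mem_filter, List.mem_flatMap, List.mem_map,
    List.mem_range'_1, decide_eq_true_eq]
  exact Or.inr ⟨⟨i, ⟨hi1, by omega⟩, j, ⟨hj1, by omega⟩, rfl⟩, hne⟩

theorem peersTable_getD (p : Nat) (hp : p < 256) :
    peersTable.getD p [] = peersB (p / 16) (p % 16) := by
  unfold peersTable
  exact PySem.List.getD_map_range _ 256 p _ hp

-- badB only reads the peers of p, never the cell p itself
theorem badB_congr (b1 b2 : List (List Int)) (p : Nat) (v : Int) (hp : p < 256)
    (h : ∀ i j, i < 16 → j < 16 → (i, j) ≠ (p / 16, p % 16) → cell2 b1 i j = cell2 b2 i j) :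
    badB b1 p v = badB b2 p v := by
  unfold badB
  rw [peersTable_getD p hp]
  apply PySem.List.any_congr_mem
  intro q hq
  obtain ⟨hq1, hq2, hq3, -⟩ := mem_peersB_lt (p / 16) (p % 16) (by omega) (by omega) q hq
  rw [h q.1 q.2 hq1 hq2 (by cases q; simpa using hq3)]

-- tryA does not depend on the content of its own frame cell
theorem tryA_ext (n : Nat) (es : List Nat) (idx : Nat) :
    ∀ (k : Nat) (v : Int), (17 - v).toNat ≤ k →
    ∀ (b1 b2 : List (List Int)), Board16 b1 → Board16 b2 →
    es.getD idx 0 < 256 →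
    (∀ i j, i < 16 → j < 16 → (i, j) ≠ (es.getD idx 0 / 16, es.getD idx 0 % 16) →
      cell2 b1 i j = cell2 b2 i j) →
    tryA n es b1 idx v = tryA n es b2 idx v := by
  intro k
  induction k with
  | zero =>
    intro v hk b1 b2 hB1 hB2 hp h
    rw [tryA.eq_def n es b1 idx v, tryA.eq_def n es b2 idx v, dif_pos (by omega : (17:Int) ≤ v), dif_pos (by omega : (17:Int) ≤ v)]
  | succ k ih =>
    intro v hk b1 b2 hB1 hB2 hp h
    by_cases h17 : (17 : Int) ≤ v
    · rw [tryA.eq_def n es b1 idx v, tryA.eq_def n es b2 idx v, dif_pos h17, dif_pos h17]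
    · have hbad : badB b1 (es.getD idx 0) v = badB b2 (es.getD idx 0) v :=
        badB_congr b1 b2 _ v hp h
      have hdeep : setAt b1 (es.getD idx 0 / 16) (es.getD idx 0 % 16) v =
          setAt b2 (es.getD idx 0 / 16) (es.getD idx 0 % 16) v := by
        apply boards_eq _ _ (pre_setAt _ _ _ _ hB1) (pre_setAt _ _ _ _ hB2)
        intro i j hi hj
        rw [cell2_setAt _ _ _ _ _ _ hB1 (by omega) (by omega),
          cell2_setAt _ _ _ _ _ _ hB2 (by omega) (by omega)]
        by_cases hij : es.getD idx 0 / 16 = i ∧ es.getD idx 0 % 16 = j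
        · rw [if_pos hij, if_pos hij]
        · rw [if_neg hij, if_neg hij]
          refine h i j hi hj ?_
          intro heq
          rw [Prod.mk.injEq] at heq
          exact hij ⟨heq.1.symm, heq.2.symm⟩
      have hrec : tryA n es b1 idx (v + 1) = tryA n es b2 idx (v + 1) :=
        ih (v + 1) (by omega) b1 b2 hB1 hB2 hp h
      rw [tryA.eq_def n es b1 idx v, tryA.eq_def n es b2 idx v, dif_neg h17, dif_neg h17, hbad, hdeep, hrec]

theorem nextVal_ge (b : List (List Int)) (p : Nat) (v : Int) : v ≤ nextVal b p v := by
  fun_induction nextVal b p v with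
  | case1 v h ih => omega
  | case2 v h => omega

theorem nextVal_le' (b : List (List Int)) (p : Nat) (v : Int) :
    nextVal b p v ≤ 17 ∨ nextVal b p v = v := by
  fun_induction nextVal b p v with
  | case1 v h ih => rcases ih with h' | h' <;> [exact Or.inl h'; exact Or.inl (by omega)]
  | case2 v h => exact Or.inr rfl

theorem nextVal_le (b : List (List Int)) (p : Nat) (v : Int) (hv : v ≤ 17) :
    nextVal b p v ≤ 17 := by
  rcases nextVal_le' b p v with h | h <;> omega

theorem nextVal_bad (b : List (List Int)) (p : Nat) (v : Int) :
    ∀ x, v ≤ x → x < nextVal b p v → badB b p x = true := by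
  fun_induction nextVal b p v with
  | case1 v h ih =>
    intro x hx1 hx2
    rcases eq_or_lt_of_le hx1 with rfl | hx
    · exact h.2
    · exact ih x (by omega) hx2
  | case2 v h =>
    intro x hx1 hx2
    omega

theorem nextVal_ok (b : List (List Int)) (p : Nat) (v : Int) :
    nextVal b p v ≤ 16 → badB b p (nextVal b p v) = false := by
  fun_induction nextVal b p v with
  | case1 v h ih => exact ih
  | case2 v h =>
    intro hle
    cases hbad : badB b p v with
    | false => rfl
    | true => exact absurd ⟨hle, hbad⟩ h

theorem tryA_skip (n : Nat) (es : List Nat) (b : List (List Int)) (idx : Nat) :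
    ∀ (k : Nat) (u v : Int), (v - u).toNat ≤ k → u ≤ v →
    (∀ x, u ≤ x → x < v → badB b (es.getD idx 0) x = true) →
    tryA n es b idx u = tryA n es b idx v := by
  intro k
  induction k with
  | zero =>
    intro u v hk huv hbad
    have : u = v := by omega
    rw [this]
  | succ k ih =>
    intro u v hk huv hbad
    rcases eq_or_lt_of_le huv with rfl | hlt
    · rfl
    · by_cases h17 : (17 : Int) ≤ u
      · rw [tryA.eq_def n es b idx u, tryA.eq_def n es b idx v, dif_pos h17, dif_pos (by omega : (17:Int) ≤ v)]
      · rw [tryA.eq_def, dif_neg h17, if_pos (hbad u le_rfl hlt)]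
        exact ih (u + 1) v (by omega) (by omega) (fun x hx1 hx2 => hbad x (by omega) hx2)

-- one odometer step of the spec: skip the bad candidates, then branch
theorem tryA_step (n : Nat) (es : List Nat) (b : List (List Int)) (idx : Nat) (u : Int)
    (hu : u ≤ 17) :
    tryA n es b idx u =
      (if nextVal b (es.getD idx 0) u ≤ 16 then
        ((if idx + 1 < n then
            tryA n es (setAt b (es.getD idx 0 / 16) (es.getD idx 0 % 16)
              (nextVal b (es.getD idx 0) u)) (idx + 1) 1
          else true)
         || tryA n es b idx (nextVal b (es.getD idx 0) u + 1))
       else false) := by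
  have hge := nextVal_ge b (es.getD idx 0) u
  have hskip : tryA n es b idx u = tryA n es b idx (nextVal b (es.getD idx 0) u) :=
    tryA_skip n es b idx (nextVal b (es.getD idx 0) u - u).toNat u _ le_rfl hge
      (fun x hx1 hx2 => nextVal_bad b (es.getD idx 0) u x hx1 hx2)
  rw [hskip]
  by_cases hnv : nextVal b (es.getD idx 0) u ≤ 16
  · rw [if_pos hnv, tryA.eq_def, dif_neg (by omega), if_neg (by rw [Bool.not_eq_true]; exact nextVal_ok b _ u hnv)]
  · have h17 : nextVal b (es.getD idx 0) u = 17 := by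
      have := nextVal_le b (es.getD idx 0) u hu
      omega
    rw [if_neg hnv, h17, tryA.eq_def, dif_pos (by omega)]

theorem find?_congr_mem {α : Type} (p q : α → Bool) :
    ∀ l : List α, (∀ x ∈ l, p x = q x) → l.find? p = l.find? q := by
  intro l
  induction l with
  | nil => intro _; rfl
  | cons a l ih =>
    intro h
    by_cases hp : p a = true
    · rw [List.find?_cons_of_pos hp, List.find?_cons_of_pos (by rw [← h a (by simp)]; exact hp)]
    · rw [List.find?_cons_of_neg hp, List.find?_cons_of_neg (by rw [← h a (by simp)]; exact hp),
        ih (fun x hx => h x (by simp [hx]))]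

theorem feInner_eq (b : List (List Int)) (i : Int) :
    ∀ js : List Int, feInner b i js = js.find? (fun j => decide (pyCell b i j = 0)) := by
  intro js
  induction js with
  | nil => rfl
  | cons j js ih =>
    by_cases h : pyCell b i j = 0
    · rw [feInner, if_pos h, List.find?_cons_of_pos (by simpa using h)]
    · rw [feInner, if_neg h, List.find?_cons_of_neg (by simpa using h), ih]

theorem len_row0 (b : List (List Int)) (hpre : Board16 b) :
    ((PySem.List.pyGet? b 0).getD []).length = 16 := by
  rw [PySem.List.pyGet?_zero, ← List.getD_eq_getElem?_getD]
  exact hpre.2 0 (by omega)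

theorem feOuter_char (b : List (List Int)) (hpre : Board16 b) :
    ∀ n i0, i0 + n = 16 →
      feOuter b ((List.range' i0 n).map (fun k : Nat => (k : Int))) =
        ((List.range' (16 * i0) (16 * n)).find? (pz b)).map
          (fun p => (((p / 16 : Nat) : Int), ((p % 16 : Nat) : Int))) := by
  intro n
  induction n with
  | zero => intro i0 h; rfl
  | succ n ih =>
    intro i0 h
    have hcong : (List.range' 0 16).find? (fun j : Nat => decide (pyCell b (i0 : Int) (j : Int) = 0)) =
        (List.range' 0 16).find? (fun c => pz b (16 * i0 + c)) := by
      apply find?_congr_mem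
      intro c hc
      rw [List.mem_range'_1] at hc
      have h1 : (16 * i0 + c) / 16 = i0 := by omega
      have h2 : (16 * i0 + c) % 16 = c := by omega
      simp only [pz, h1, h2, pyCell_natCast]
    rw [List.range'_succ, List.map_cons, feOuter, len_row0 b hpre]
    rw [show (((16 : Nat) : Int)) = (16 : Int) from by norm_num, PySem.List.pyRange_zero,
      show ((16 : Int)).toNat = 16 from rfl, feInner_eq, List.range_eq_range', List.find?_map]
    simp only [Function.comp_def]
    rw [hcong]
    rw [show 16 * (n + 1) = 16 + 16 * n from by ring]
    rw [← List.range'_append (s := 16 * i0) (m := 16) (n := 16 * n) (step := 1)]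
    rw [List.find?_append]
    rw [show List.range' (16 * i0) 16 = (List.range' 0 16).map (fun x => 16 * i0 + x) from by
      rw [List.range'_eq_map_range, List.range_eq_range']]
    rw [List.find?_map]
    simp only [Function.comp_def]
    cases hf : (List.range' 0 16).find? (fun c => pz b (16 * i0 + c)) with
    | none =>
      simp only [Option.map_none, Option.none_or]
      rw [show 16 * i0 + 1 * 16 = 16 * (i0 + 1) from by ring]
      exact ih (i0 + 1) (by omega)
    | some c =>
      have hc16 : c < 16 := by
        have := List.mem_of_find?_eq_some hf
        rw [List.mem_range'_1] at this
        omega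
      simp only [Option.map_some, Option.some_or]
      have h1 : (16 * i0 + c) / 16 = i0 := by omega
      have h2 : (16 * i0 + c) % 16 = c := by omega
      rw [h1, h2]

theorem find_empty_char (b : List (List Int)) (hpre : Board16 b) :
    find_empty b =
      (firstZero b).map (fun p => (((p / 16 : Nat) : Int), ((p % 16 : Nat) : Int))) := by
  unfold find_empty firstZero
  rw [hpre.1, show (((16 : Nat) : Int)) = (16 : Int) from by norm_num, PySem.List.pyRange_zero,
    show ((16 : Int)).toNat = 16 from rfl, List.range_eq_range']
  have := feOuter_char b hpre 16 0 (by omega)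
  simpa using this

-- B's peer-scan check agrees with A's valid (both ignore the cell at pos itself)
theorem valid_eq_bad (b : List (List Int)) (r c : Nat) (v : Int)
    (hpre : Board16 b) (hr : r < 16) (hc : c < 16) :
    valid b v ((r : Int), (c : Int)) = !(badB b (16 * r + c) v) := by
  have e1 : (16 * r + c) / 16 = r := by omega
  have e2 : (16 * r + c) % 16 = c := by omega
  have hbB : badB b (16 * r + c) v = (peersB r c).any (fun q => cell2 b q.1 q.2 == v) := by
    unfold badB
    rw [peersTable_getD _ (by omega), e1, e2]
  rw [hbB]
  have hb0' : ((((PySem.List.pyGet? b 0).getD []).length : Nat) : Int) = (16 : Int) := by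
    rw [len_row0 b hpre]; norm_num
  have hlen' : ((b.length : Nat) : Int) = (16 : Int) := by rw [hpre.1]; norm_num
  have hy0 : PySem.Int.floordiv ((r : Nat) : Int) 4 = (((r / 4 : Nat)) : Int) := by
    exact_mod_cast PySem.Int.floordiv_natCast r 4
  have hx0 : PySem.Int.floordiv ((c : Nat) : Int) 4 = (((c / 4 : Nat)) : Int) := by
    exact_mod_cast PySem.Int.floordiv_natCast c 4
  have hval : valid b v ((r : Int), (c : Int)) = true ↔
      ((∀ i : Int, 0 ≤ i → i < 16 → (¬ pyCell b (r : Int) i = v ∨ ((c : Nat) : Int) = i)) ∧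
       (∀ i : Int, 0 ≤ i → i < 16 → (¬ pyCell b i (c : Int) = v ∨ ((r : Nat) : Int) = i)) ∧
       (∀ i : Int, ((r / 4 : Nat) : Int) * 4 ≤ i → i < ((r / 4 : Nat) : Int) * 4 + 4 →
        ∀ j : Int, ((c / 4 : Nat) : Int) * 4 ≤ j → j < ((c / 4 : Nat) : Int) * 4 + 4 →
          (¬ pyCell b i j = v ∨ (i, j) = ((r : Int), (c : Int))))) := by
    unfold valid
    simp only [Bool.and_eq_true, List.all_eq_true, hb0', hlen', hy0, hx0,
      PySem.List.mem_pyRange_one, and_imp, Bool.not_and, Bool.or_eq_true, Bool.not_eq_true',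
      beq_eq_false_iff_ne, ne_eq, bne_eq_false_iff_eq]
    constructor
    · rintro ⟨⟨h1, h2⟩, h3⟩
      exact ⟨h1, h2, h3⟩
    · rintro ⟨h1, h2, h3⟩
      exact ⟨⟨h1, h2⟩, h3⟩
  cases hA : (peersB r c).any (fun q => cell2 b q.1 q.2 == v) with
  | false =>
    have hall : ∀ q ∈ peersB r c, ¬ cell2 b q.1 q.2 = v := by
      intro q hq
      have := List.any_eq_false.mp hA q hq
      simpa using this
    simp only [Bool.not_false]
    rw [hval]
    refine ⟨?_, ?_, ?_⟩
    · intro i h0 h16i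
      by_cases hci : ((c : Nat) : Int) = i
      · exact Or.inr hci
      · refine Or.inl ?_
        have hcell : pyCell b (r : Int) i = cell2 b r i.toNat := by
          rw [← pyCell_natCast, Int.toNat_of_nonneg h0]
        rw [hcell]
        exact hall (r, i.toNat) (row_mem_peersB r c i.toNat (by omega) (by omega))
    · intro i h0 h16i
      by_cases hri : ((r : Nat) : Int) = i
      · exact Or.inr hri
      · refine Or.inl ?_
        have hcell : pyCell b i (c : Int) = cell2 b i.toNat c := by
          rw [← pyCell_natCast, Int.toNat_of_nonneg h0]
        rw [hcell]
        exact hall (i.toNat, c) (col_mem_peersB r c i.toNat (by omega) (by omega))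
    · intro i hi1 hi2 j hj1 hj2
      have hr4 : (0 : Int) ≤ ((r / 4 : Nat) : Int) := Int.natCast_nonneg _
      have hc4 : (0 : Int) ≤ ((c / 4 : Nat) : Int) := Int.natCast_nonneg _
      by_cases hij : (i, j) = ((r : Int), (c : Int))
      · exact Or.inr hij
      · refine Or.inl ?_
        have hi0 : (0 : Int) ≤ i := by omega
        have hj0 : (0 : Int) ≤ j := by omega
        have hcell : pyCell b i j = cell2 b i.toNat j.toNat := by
          rw [← pyCell_natCast, Int.toNat_of_nonneg hi0, Int.toNat_of_nonneg hj0]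
        rw [hcell]
        refine hall (i.toNat, j.toNat) (box_mem_peersB r c i.toNat j.toNat
          (by omega) (by omega) (by omega) (by omega) ?_)
        intro heq
        rw [Prod.mk.injEq] at heq
        exact hij (by rw [Prod.mk.injEq]; omega)
  | true =>
    simp only [Bool.not_true]
    cases hV : valid b v ((r : Int), (c : Int)) with
    | false => rfl
    | true =>
      exfalso
      obtain ⟨q, hqmem, hqv⟩ := List.any_eq_true.mp hA
      have hqv' : cell2 b q.1 q.2 = v := by simpa using hqv
      obtain ⟨hq1, hq2, hq3, hchunk⟩ := mem_peersB_lt r c hr hc q hqmem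
      obtain ⟨P1, P2, P3⟩ := hval.mp hV
      rcases hchunk with hrow | hcol | hbox
      · rcases P1 (q.2 : Int) (by positivity) (by exact_mod_cast hq2) with hne | heq
        · apply hne
          rw [← hrow, pyCell_natCast]
          exact hqv'
        · have : c = q.2 := by exact_mod_cast heq
          apply hq3
          cases q
          simp_all [Prod.mk.injEq]
      · rcases P2 (q.1 : Int) (by positivity) (by exact_mod_cast hq1) with hne | heq
        · apply hne
          rw [← hcol, pyCell_natCast]
          exact hqv'
        · have : r = q.1 := by exact_mod_cast heq
          apply hq3
          cases q
          simp_all [Prod.mk.injEq]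
      · obtain ⟨hb1, hb2, hb3, hb4⟩ := hbox
        rcases P3 (q.1 : Int) (by exact_mod_cast Nat.cast_le.mpr hb1) (by push_cast; omega)
            (q.2 : Int) (by exact_mod_cast Nat.cast_le.mpr hb3) (by push_cast; omega) with
          hne | heq
        · exact hne (by rw [pyCell_natCast]; exact hqv')
        · rw [Prod.mk.injEq] at heq
          apply hq3
          cases q
          rw [Prod.mk.injEq]
          constructor <;> [exact_mod_cast heq.1; exact_mod_cast heq.2]

theorem find?_eq_head_filter {p : Nat → Bool} : ∀ l : List Nat, l.find? p = (l.filter p).head? := by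
  intro l
  induction l with
  | nil => rfl
  | cons x l ih =>
    by_cases hx : p x = true
    · rw [List.find?_cons_of_pos hx, List.filter_cons_of_pos hx, List.head?_cons]
    · rw [List.find?_cons_of_neg hx, List.filter_cons_of_neg hx, ih]

theorem filter_update {p p' : Nat → Bool} : ∀ (l : List Nat) (a : Nat) (t : List Nat),
    l.Nodup → l.filter p = a :: t → (∀ x ∈ l, x ≠ a → p' x = p x) → p' a = false →
    l.filter p' = t := by
  intro l
  induction l with
  | nil => intro a t _ h _ _; simp at h
  | cons x l ih =>
    intro a t hnd h hcong hfa
    obtain ⟨hxl, hnd'⟩ := List.nodup_cons.mp hnd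
    by_cases hx : p x = true
    · rw [List.filter_cons_of_pos hx] at h
      injection h with h1 h2
      subst h1
      rw [List.filter_cons_of_neg (by simp [hfa]), ← h2]
      exact List.filter_congr fun y hy =>
        hcong y (by simp [hy]) (by rintro rfl; exact hxl hy)
    · rw [List.filter_cons_of_neg hx] at h
      by_cases hxa : x = a
      · subst hxa
        exact absurd (List.mem_of_mem_filter (by rw [h]; exact List.mem_cons_self)) hxl
      · rw [List.filter_cons_of_neg (by rw [hcong x (by simp) hxa]; exact hx)]
        exact ih a t hnd' h (fun y hy hya => hcong y (by simp [hy]) hya) hfa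

theorem empties_block (b : List (List Int)) : ∀ n i0, i0 + n = 16 →
    (List.range' (16 * i0) (16 * n)).filter (pz b) =
      (List.range' i0 n).flatMap (fun i =>
        ((List.range' 0 16).filter (fun j => decide (cell2 b i j = 0))).map
          (fun j => 16 * i + j)) := by
  intro n
  induction n with
  | zero => intro i0 h; rfl
  | succ n ih =>
    intro i0 h
    rw [show List.range' i0 (n + 1) = i0 :: List.range' (i0 + 1) n from List.range'_succ,
      List.flatMap_cons]
    rw [show 16 * (n + 1) = 16 + 16 * n from by ring]
    rw [← List.range'_append (s := 16 * i0) (m := 16) (n := 16 * n) (step := 1)]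
    rw [List.filter_append]
    rw [show List.range' (16 * i0) 16 = (List.range' 0 16).map (fun x => 16 * i0 + x) from by
      rw [List.range'_eq_map_range, List.range_eq_range']]
    rw [List.filter_map]
    have hcg : (List.range' 0 16).filter (pz b ∘ fun x => 16 * i0 + x) =
        (List.range' 0 16).filter (fun j => decide (cell2 b i0 j = 0)) := by
      apply List.filter_congr
      intro j hj
      rw [List.mem_range'_1] at hj
      have h1 : (16 * i0 + j) / 16 = i0 := by omega
      have h2 : (16 * i0 + j) % 16 = j := by omega
      simp only [Function.comp_apply, pz, h1, h2]
    rw [hcg, show 16 * i0 + 1 * 16 = 16 * (i0 + 1) from by ring, ih (i0 + 1) (by omega)]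

theorem emptiesOf_char (b : List (List Int)) (hpre : Board16 b) :
    emptiesOf b = (List.range' 0 256).filter (pz b) := by
  have hne : b.isEmpty = false := by
    cases b with
    | nil => exact absurd hpre.1 (by simp)
    | cons x l => rfl
  have hb := empties_block b 16 0 (by omega)
  simp only [cell2] at hb
  rw [show 16 * 0 = 0 from rfl, show 16 * 16 = 256 from rfl] at hb
  unfold emptiesOf
  rw [hne]
  simp only [Bool.false_eq_true, if_false]
  rw [hpre.1, hpre.2 0 (by omega), List.range_eq_range']
  exact hb.symm

theorem zeroFree_empties (b : List (List Int)) (hz : ZeroFree b) : emptiesOf b = [] := by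
  have hw : (if b.isEmpty then 0 else (b.getD 0 []).length) = (b.getD 0 []).length := by
    cases b <;> simp
  unfold emptiesOf
  rw [hw, List.flatMap_eq_nil_iff]
  intro i hi
  rw [List.mem_range] at hi
  rw [List.map_eq_nil_iff, List.filter_eq_nil_iff]
  intro j hj
  rw [List.mem_range] at hj
  simp only [decide_eq_true_eq]
  exact (hz i hi).2 j hj

theorem zeroFree_find_empty (b : List (List Int)) (hz : ZeroFree b) : find_empty b = none := by
  unfold find_empty
  suffices h : ∀ is : List Int, (∀ i ∈ is, 0 ≤ i ∧ i < (b.length : Int)) → feOuter b is = none by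
    apply h
    intro i hi
    rw [PySem.List.mem_pyRange_one] at hi
    exact hi
  intro is
  induction is with
  | nil => intro _; rfl
  | cons i is ih =>
    intro h
    obtain ⟨h0, hlt⟩ := h i List.mem_cons_self
    have hinner : feInner b i
        (PySem.List.pyRange 0 ((((PySem.List.pyGet? b 0).getD []).length : Int)) 1) = none := by
      rw [feInner_eq, List.find?_eq_none]
      intro j hj
      rw [PySem.List.mem_pyRange_one] at hj
      obtain ⟨hj0, hjlt⟩ := hj
      have hrow : (PySem.List.pyGet? b 0).getD [] = b.getD 0 [] := by
        rw [PySem.List.pyGet?_zero, ← List.getD_eq_getElem?_getD]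
      rw [hrow] at hjlt
      rw [show i = ((i.toNat : Nat) : Int) from (Int.toNat_of_nonneg h0).symm,
        show j = ((j.toNat : Nat) : Int) from (Int.toNat_of_nonneg hj0).symm, pyCell_natCast]
      simp only [decide_eq_true_eq]
      exact (hz i.toNat (by omega)).2 j.toNat (by omega)
    rw [feOuter, hinner]
    exact ih fun x hx => h x (List.mem_cons_of_mem _ hx)

-- per row: the indices of the zero entries are as many as the zero entries
theorem count_row : ∀ (l : List Int),
    ((List.range l.length).filter (fun j => decide (l.getD j 0 = 0))).length = l.count 0 := by
  intro l
  induction l with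
  | nil => rfl
  | cons x xs ih =>
    rw [List.length_cons, List.range_succ_eq_map, List.filter_cons, List.filter_map,
      List.count_cons]
    have hcomp : ((fun j => decide ((x :: xs).getD j 0 = 0)) ∘ Nat.succ) =
        (fun j => decide (xs.getD j 0 = 0)) := by
      funext j
      simp
    rw [hcomp]
    by_cases hx : x = (0 : Int)
    · rw [if_pos (by simp [hx]), if_pos (by simp [hx])]
      rw [List.length_cons, List.length_map, ih]
    · rw [if_neg (by simp [hx]), if_neg (by simp [hx])]
      rw [List.length_map, ih]
      omega

-- number of zero cells = length of the empties list
theorem count_zeros_eq (b : List (List Int)) (hpre : Board16 b) :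
    (b.map fun r => r.count 0).sum = (emptiesOf b).length := by
  have hne : b.isEmpty = false := by
    cases b with
    | nil => exact absurd hpre.1 (by simp)
    | cons x l => rfl
  unfold emptiesOf
  rw [hne]
  simp only [Bool.false_eq_true, if_false, List.length_flatMap]
  have hmaps : (List.range b.length).map (fun i =>
      ((((List.range (b.getD 0 []).length).filter
        (fun j => decide ((b.getD i []).getD j 0 = 0))).map (fun j => 16 * i + j)).length)) =
      b.map (fun r => r.count 0) := by
    apply List.ext_getElem (by simp)
    intro k hk1 hk2
    simp only [List.getElem_map, List.getElem_range, List.length_map]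
    have hkb : k < b.length := by simpa using hk1
    have hk : k < 16 := by
      have := hpre.1
      omega
    have hrow : b.getD k [] = b[k]'hkb := List.getD_eq_getElem _ _ hkb
    rw [hpre.2 0 (by omega), show (16 : Nat) = (b.getD k []).length from (hpre.2 k hk).symm,
      count_row, hrow]
  rw [← hmaps]

-- A's recursion at a board whose zero set is the tail of es from idx equals tryA
theorem keyA (f : Nat) : ∀ (b : List (List Int)) (es : List Nat) (idx : Nat),
    Board16 b → idx ≤ es.length →
    (List.range' 0 256).filter (pz b) = es.drop idx →
    es.length - idx < f →
    solveFuel f b = (if idx = es.length then true else tryA es.length es b idx 1) := by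
  induction f with
  | zero => intro b es idx _ _ _ h; omega
  | succ f ih =>
    intro b es idx h16 hidx hfil hfuel
    rw [solveFuel, find_empty_char b h16]
    have hfz : firstZero b = (es.drop idx).head? := by
      unfold firstZero
      rw [find?_eq_head_filter, hfil]
    by_cases hend : idx = es.length
    · have hdrop : es.drop idx = [] := by rw [hend, List.drop_length]
      rw [hfz, hdrop, if_pos hend]
      rfl
    · have hlt : idx < es.length := by omega
      have hdrop : es.drop idx = es[idx] :: es.drop (idx + 1) := List.drop_eq_getElem_cons hlt
      have hmem : es[idx] ∈ (List.range' 0 256).filter (pz b) := by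
        rw [hfil, hdrop]
        exact List.mem_cons_self
      have hq256 : es[idx] < 256 := by
        have := List.mem_of_mem_filter hmem
        rw [List.mem_range'_1] at this
        omega
      have hq0 : cell2 b (es[idx] / 16) (es[idx] % 16) = 0 := by
        have := List.of_mem_filter hmem
        simpa [pz] using this
      have hgd : es.getD idx 0 = es[idx] := List.getD_eq_getElem es 0 hlt
      rw [hfz, hdrop]
      simp only [List.head?_cons, Option.map_some]
      rw [if_neg hend]
      suffices H : ∀ (k : Nat) (v : Int), 1 ≤ v → v ≤ 17 → (17 - v).toNat ≤ k →
          ((PySem.List.pyRange v 17 1).any fun i =>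
            valid b i (((es[idx] / 16 : Nat) : Int), ((es[idx] % 16 : Nat) : Int)) &&
            solveFuel f (setCell b ((es[idx] / 16 : Nat) : Int) ((es[idx] % 16 : Nat) : Int) i)) =
          tryA es.length es b idx v by
        exact H 16 1 (by norm_num) (by norm_num) (by norm_num)
      intro k
      induction k with
      | zero =>
        intro v h1 h17 hk
        have hv : v = 17 := by omega
        subst hv
        rw [PySem.List.pyRange_one_eq_nil (by omega), List.any_nil,
          tryA.eq_def, dif_pos (by omega : (17 : Int) ≤ 17)]
      | succ k ihk =>
        intro v h1 h17 hk
        rcases eq_or_lt_of_le h17 with rfl | hv16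
        · rw [PySem.List.pyRange_one_eq_nil (by omega), List.any_nil,
            tryA.eq_def, dif_pos (by omega : (17 : Int) ≤ 17)]
        · rw [PySem.List.pyRange_one_cons (by omega), List.any_cons]
          rw [tryA.eq_def, dif_neg (by omega), hgd]
          have hvb : valid b v (((es[idx] / 16 : Nat) : Int), ((es[idx] % 16 : Nat) : Int)) =
              !(badB b es[idx] v) := by
            have h1616 : 16 * (es[idx] / 16) + es[idx] % 16 = es[idx] := by omega
            rw [valid_eq_bad b (es[idx] / 16) (es[idx] % 16) v h16 (by omega) (by omega), h1616]
          by_cases hbad : badB b es[idx] v = true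
          · rw [if_pos hbad, hvb, hbad]
            simp only [Bool.not_true, Bool.false_and, Bool.false_or]
            exact ihk (v + 1) (by omega) (by omega) (by omega)
          · have hbadf : badB b es[idx] v = false := by
              cases h : badB b es[idx] v
              · rfl
              · exact absurd h hbad
            rw [if_neg hbad, hvb, hbadf]
            simp only [Bool.not_false, Bool.true_and]
            congr 1
            · rw [setCell_natCast]
              have hb' : Board16 (setAt b (es[idx] / 16) (es[idx] % 16) v) :=
                pre_setAt _ _ _ _ h16
              have hfil' : (List.range' 0 256).filter
                  (pz (setAt b (es[idx] / 16) (es[idx] % 16) v)) = es.drop (idx + 1) := by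
                apply filter_update (p := pz b) (List.range' 0 256) es[idx] (es.drop (idx + 1))
                  (List.nodup_range' 1) (by rw [hfil, hdrop])
                · intro x hx hne
                  rw [List.mem_range'_1] at hx
                  simp only [pz]
                  rw [cell2_setAt b (es[idx] / 16) (es[idx] % 16) (x / 16) (x % 16) v h16
                    (by omega) (by omega), if_neg (by rintro ⟨e1, e2⟩; exact hne (by omega))]
                · simp only [pz]
                  rw [cell2_setAt b (es[idx] / 16) (es[idx] % 16) (es[idx] / 16) (es[idx] % 16) v
                    h16 (by omega) (by omega), if_pos ⟨rfl, rfl⟩]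
                  simp only [decide_eq_false_iff_not]
                  omega
              rw [ih _ es (idx + 1) hb' (by omega) hfil' (by omega)]
              by_cases hend2 : idx + 1 = es.length
              · rw [if_pos hend2, if_neg (by omega)]
              · rw [if_neg hend2, if_pos (by omega)]
            · exact ihk (v + 1) (by omega) (by omega) (by omega)

-- the odometer loop, started at frame idx whose cell holds w, resolves exactly
-- tryA from w+1 and otherwise pops, within a fuel bound
theorem loopB_step (f : Nat) (b : List (List Int)) (es : List Nat) (idx : Nat)
    (h : idx < es.length) :
    loopB (f + 1) b es (idx : Int) =
      (if nextVal b (es.getD idx 0) (cell2 b (es.getD idx 0 / 16) (es.getD idx 0 % 16) + 1) ≤ 16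
       then loopB f (setAt b (es.getD idx 0 / 16) (es.getD idx 0 % 16)
         (nextVal b (es.getD idx 0) (cell2 b (es.getD idx 0 / 16) (es.getD idx 0 % 16) + 1)))
         es ((idx : Int) + 1)
       else loopB f (setAt b (es.getD idx 0 / 16) (es.getD idx 0 % 16) 0) es ((idx : Int) - 1)) := by
  rw [loopB]
  rw [if_pos ⟨by positivity, by exact_mod_cast h⟩]
  simp only [Int.toNat_natCast]

theorem loopB_exit (f : Nat) (b : List (List Int)) (es : List Nat) (idx : Int)
    (h : ¬(0 ≤ idx ∧ idx < (es.length : Int))) :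
    loopB (f + 1) b es idx = some (idx == (es.length : Int)) := by
  rw [loopB, if_neg h]

theorem keyB : ∀ (μ : Nat) (b : List (List Int)) (es : List Nat) (idx : Nat),
    Board16 b → es.Nodup → (∀ p ∈ es, p < 256) → idx < es.length →
    (∀ j, idx < j → j < es.length → cell2 b (es.getD j 0 / 16) (es.getD j 0 % 16) = 0) →
    0 ≤ cell2 b (es.getD idx 0 / 16) (es.getD idx 0 % 16) →
    cell2 b (es.getD idx 0 / 16) (es.getD idx 0 % 16) ≤ 16 →
    (es.length - idx) * 18 +
      (17 - cell2 b (es.getD idx 0 / 16) (es.getD idx 0 % 16)).toNat ≤ μ →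
    ∃ k k', k' < k ∧
      k ≤ 2 * (17 - cell2 b (es.getD idx 0 / 16) (es.getD idx 0 % 16)).toNat *
        18 ^ (es.length - idx - 1) ∧
      ∀ f, loopB (f + k) b es (idx : Int) =
        (if tryA es.length es b idx
            (cell2 b (es.getD idx 0 / 16) (es.getD idx 0 % 16) + 1) then some true
         else loopB (f + k') (setAt b (es.getD idx 0 / 16) (es.getD idx 0 % 16) 0) es
           ((idx : Int) - 1)) := by
  intro mu
  induction mu using Nat.strong_induction_on with
  | _ mu IH =>
  intro b es idx hB hnd h256 hidx hzero hw0 hw16 hmu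
  have hgd : es.getD idx 0 = es[idx] := List.getD_eq_getElem es 0 hidx
  have hp256 : es.getD idx 0 < 256 := by
    rw [hgd]
    exact h256 _ (List.getElem_mem hidx)
  have hr16 : es.getD idx 0 / 16 < 16 := by omega
  have hc16 : es.getD idx 0 % 16 < 16 := by omega
  have hnvge : cell2 b (es.getD idx 0 / 16) (es.getD idx 0 % 16) + 1 ≤
      nextVal b (es.getD idx 0) (cell2 b (es.getD idx 0 / 16) (es.getD idx 0 % 16) + 1) :=
    nextVal_ge _ _ _
  have hnvle : nextVal b (es.getD idx 0) (cell2 b (es.getD idx 0 / 16) (es.getD idx 0 % 16) + 1) ≤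
      17 := nextVal_le _ _ _ (by omega)
  have hpow1 : 0 < 18 ^ (es.length - idx - 1) := pow_pos (by norm_num) _
  have hA : 1 ≤ (17 - cell2 b (es.getD idx 0 / 16) (es.getD idx 0 % 16)).toNat := by omega
  by_cases hpush : nextVal b (es.getD idx 0)
      (cell2 b (es.getD idx 0 / 16) (es.getD idx 0 % 16) + 1) ≤ 16
  · -- a value fits: the loop pushes to frame idx+1
    by_cases hn1 : idx + 1 = es.length
    · -- pushing fills the last empty cell: the loop exits with True
      refine ⟨2, 0, by omega, by nlinarith [hpow1, hA], ?_⟩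
      intro f
      rw [show f + 2 = (f + 1) + 1 from rfl, loopB_step (f + 1) b es idx hidx,
        if_pos hpush]
      rw [show ((idx : Int) + 1) = ((idx + 1 : Nat) : Int) from by push_cast; ring]
      rw [loopB_exit f _ es _ (by push_cast; omega)]
      rw [tryA_step es.length es b idx _ (by omega), if_pos hpush,
        if_neg (show ¬(idx + 1 < es.length) from by omega)]
      simp [hn1]
    · -- deeper frames remain
      have hn2 : idx + 1 < es.length := by omega
      have hgd1 : es.getD (idx + 1) 0 = es[idx + 1] := List.getD_eq_getElem es 0 hn2
      have hp1256 : es.getD (idx + 1) 0 < 256 := by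
        rw [hgd1]
        exact h256 _ (List.getElem_mem hn2)
      have hpne : es.getD (idx + 1) 0 ≠ es.getD idx 0 := by
        rw [hgd, hgd1]
        intro he
        have := (List.Nodup.getElem_inj_iff hnd).mp he
        omega
      have hcne : ¬(es.getD idx 0 / 16 = es.getD (idx + 1) 0 / 16 ∧
          es.getD idx 0 % 16 = es.getD (idx + 1) 0 % 16) := by
        rintro ⟨e1, e2⟩
        exact hpne (by omega)
      -- the pushed board
      set nv := nextVal b (es.getD idx 0) (cell2 b (es.getD idx 0 / 16) (es.getD idx 0 % 16) + 1)
        with hnvdef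
      set b1 := setAt b (es.getD idx 0 / 16) (es.getD idx 0 % 16) nv with hb1
      have hB1 : Board16 b1 := pre_setAt _ _ _ _ hB
      have hcell1 : cell2 b1 (es.getD (idx + 1) 0 / 16) (es.getD (idx + 1) 0 % 16) = 0 := by
        rw [hb1, cell2_setAt _ _ _ _ _ _ hB hr16 hc16, if_neg hcne]
        exact hzero (idx + 1) (by omega) hn2
      have hzero1 : ∀ j, idx + 1 < j → j < es.length →
          cell2 b1 (es.getD j 0 / 16) (es.getD j 0 % 16) = 0 := by
        intro j hj1 hj2
        have hgdj : es.getD j 0 = es[j] := List.getD_eq_getElem es 0 hj2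
        have hpjne : ¬(es.getD idx 0 / 16 = es.getD j 0 / 16 ∧
            es.getD idx 0 % 16 = es.getD j 0 % 16) := by
          rintro ⟨e1, e2⟩
          have hpj256 : es.getD j 0 < 256 := by
            rw [hgdj]; exact h256 _ (List.getElem_mem hj2)
          have : es.getD idx 0 = es.getD j 0 := by omega
          rw [hgd, hgdj] at this
          have := (List.Nodup.getElem_inj_iff hnd).mp this
          omega
        rw [hb1, cell2_setAt _ _ _ _ _ _ hB hr16 hc16, if_neg hpjne]
        exact hzero j (by omega) hj2
      obtain ⟨k1, k1', hk1lt, hk1b, hloop1⟩ := IH ((es.length - (idx + 1)) * 18 + 17)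
        (by omega) b1 es (idx + 1) hB1 hnd h256 hn2 hzero1
        (by rw [hcell1]) (by rw [hcell1]; norm_num) (by rw [hcell1]; omega)
      -- the popped-back board (frame idx holds nv, deeper cells zero again)
      set b2 := setAt b1 (es.getD (idx + 1) 0 / 16) (es.getD (idx + 1) 0 % 16) 0 with hb2
      have hB2 : Board16 b2 := pre_setAt _ _ _ _ hB1
      have hr116 : es.getD (idx + 1) 0 / 16 < 16 := by omega
      have hc116 : es.getD (idx + 1) 0 % 16 < 16 := by omega
      have hcell2 : cell2 b2 (es.getD idx 0 / 16) (es.getD idx 0 % 16) = nv := by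
        rw [hb2, cell2_setAt _ _ _ _ _ _ hB1 hr116 hc116,
          if_neg (by rintro ⟨e1, e2⟩; exact hpne (by omega)), hb1,
          cell2_setAt _ _ _ _ _ _ hB hr16 hc16, if_pos ⟨rfl, rfl⟩]
      have hzero2 : ∀ j, idx < j → j < es.length →
          cell2 b2 (es.getD j 0 / 16) (es.getD j 0 % 16) = 0 := by
        intro j hj1 hj2
        by_cases hj : j = idx + 1
        · subst hj
          rw [hb2, cell2_setAt _ _ _ _ _ _ hB1 hr116 hc116, if_pos ⟨rfl, rfl⟩]
        · have hgdj : es.getD j 0 = es[j] := List.getD_eq_getElem es 0 hj2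
          have hpj256 : es.getD j 0 < 256 := by
            rw [hgdj]; exact h256 _ (List.getElem_mem hj2)
          have hne1 : ¬(es.getD (idx + 1) 0 / 16 = es.getD j 0 / 16 ∧
              es.getD (idx + 1) 0 % 16 = es.getD j 0 % 16) := by
            rintro ⟨e1, e2⟩
            have : es.getD (idx + 1) 0 = es.getD j 0 := by omega
            rw [hgd1, hgdj] at this
            have := (List.Nodup.getElem_inj_iff hnd).mp this
            omega
          rw [hb2, cell2_setAt _ _ _ _ _ _ hB1 hr116 hc116, if_neg hne1]
          exact hzero1 j (by omega) hj2
      obtain ⟨k2, k2', hk2lt, hk2b, hloop2⟩ := IH ((es.length - idx) * 18 + (17 - nv).toNat)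
        (by omega) b2 es idx hB2 hnd h256 hidx hzero2
        (by rw [hcell2]; omega) (by rw [hcell2]; omega) (by rw [hcell2])
      -- the two tryA calls on b2 are calls on b: they never read the frame cell
      have hext : tryA es.length es b2 idx (nv + 1) = tryA es.length es b idx (nv + 1) := by
        apply tryA_ext es.length es idx ((17 - (nv + 1)).toNat) (nv + 1) le_rfl b2 b hB2 hB hp256
        intro i j hi hj hij
        rw [hb2, cell2_setAt _ _ _ _ _ _ hB1 hr116 hc116]
        by_cases h1 : es.getD (idx + 1) 0 / 16 = i ∧ es.getD (idx + 1) 0 % 16 = j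
        · rw [if_pos h1]
          have : cell2 b (es.getD (idx + 1) 0 / 16) (es.getD (idx + 1) 0 % 16) = 0 :=
            hzero (idx + 1) (by omega) hn2
          rw [← h1.1, ← h1.2]
          omega
        · rw [if_neg h1, hb1, cell2_setAt _ _ _ _ _ _ hB hr16 hc16,
            if_neg (by rintro ⟨e1, e2⟩; exact hij (by rw [Prod.mk.injEq]; omega))]
      have hpopeq : setAt b2 (es.getD idx 0 / 16) (es.getD idx 0 % 16) 0 =
          setAt b (es.getD idx 0 / 16) (es.getD idx 0 % 16) 0 := by
        apply boards_eq _ _ (pre_setAt _ _ _ _ hB2) (pre_setAt _ _ _ _ hB)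
        intro i j hi hj
        rw [cell2_setAt _ _ _ _ _ _ hB2 hr16 hc16, cell2_setAt _ _ _ _ _ _ hB hr16 hc16]
        by_cases h0 : es.getD idx 0 / 16 = i ∧ es.getD idx 0 % 16 = j
        · rw [if_pos h0, if_pos h0]
        · rw [if_neg h0, if_neg h0, hb2, cell2_setAt _ _ _ _ _ _ hB1 hr116 hc116]
          by_cases h1 : es.getD (idx + 1) 0 / 16 = i ∧ es.getD (idx + 1) 0 % 16 = j
          · rw [if_pos h1]
            have : cell2 b (es.getD (idx + 1) 0 / 16) (es.getD (idx + 1) 0 % 16) = 0 :=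
              hzero (idx + 1) (by omega) hn2
            rw [← h1.1, ← h1.2]
            omega
          · rw [if_neg h1, hb1, cell2_setAt _ _ _ _ _ _ hB hr16 hc16, if_neg h0]
      -- fuel bound for the composed run
      have hbound : 1 + k1 + k2 ≤
          2 * (17 - cell2 b (es.getD idx 0 / 16) (es.getD idx 0 % 16)).toNat *
            18 ^ (es.length - idx - 1) := by
        have he1 : es.length - (idx + 1) - 1 = es.length - idx - 2 := by omega
        have he2 : es.length - idx - 1 = (es.length - idx - 2) + 1 := by omega
        have hpow2 : 0 < 18 ^ (es.length - idx - 2) := pow_pos (by norm_num) _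
        have hA17 : ((17 : Int) - 0).toNat = 17 := by decide
        rw [he1, hcell1, hA17] at hk1b
        rw [he2, pow_succ]
        rw [he2, pow_succ, hcell2] at hk2b
        have hAB : (17 - nv).toNat + 1 ≤
            (17 - cell2 b (es.getD idx 0 / 16) (es.getD idx 0 % 16)).toNat := by omega
        have key : 2 * ((17 - nv).toNat + 1) * (18 ^ (es.length - idx - 2) * 18) ≤
            2 * (17 - cell2 b (es.getD idx 0 / 16) (es.getD idx 0 % 16)).toNat *
              (18 ^ (es.length - idx - 2) * 18) :=
          Nat.mul_le_mul_right _ (Nat.mul_le_mul_left 2 hAB)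
        have expand : 2 * ((17 - nv).toNat + 1) * (18 ^ (es.length - idx - 2) * 18) =
            2 * (17 - nv).toNat * (18 ^ (es.length - idx - 2) * 18) +
              36 * 18 ^ (es.length - idx - 2) := by ring
        omega
      refine ⟨1 + k1 + k2, k1' + k2', by omega, hbound, ?_⟩
      intro f
      rw [show f + (1 + k1 + k2) = ((f + k2) + k1) + 1 from by ring, loopB_step _ b es idx hidx,
        if_pos hpush]
      rw [show ((idx : Int) + 1) = ((idx + 1 : Nat) : Int) from by push_cast; ring]
      rw [← hnvdef, ← hb1, hloop1 (f + k2)]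
      rw [hcell1]
      rw [show ((0 : Int) + 1) = 1 from by norm_num]
      rw [tryA_step es.length es b idx _ (by omega), if_pos hpush, if_pos hn2, ← hnvdef, ← hb1]
      cases hT1 : tryA es.length es b1 (idx + 1) 1 with
      | true => simp [hT1]
      | false =>
        simp only [hT1, Bool.false_eq_true, if_false, Bool.false_or]
        rw [show ((idx + 1 : Nat) : Int) - 1 = (idx : Int) from by push_cast; ring]
        rw [show f + k2 + k1' = f + k1' + k2 from by ring, hloop2 (f + k1')]
        rw [hcell2, hext]
        cases hT2 : tryA es.length es b idx (nv + 1) with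
        | true => simp [hT2]
        | false =>
          simp only [hT2, Bool.false_eq_true, if_false]
          rw [hpopeq, show f + k1' + k2' = f + (k1' + k2') from by ring]
  · -- no value fits: the loop pops
    have hnv17 : nextVal b (es.getD idx 0)
        (cell2 b (es.getD idx 0 / 16) (es.getD idx 0 % 16) + 1) = 17 := by omega
    refine ⟨1, 0, by omega, by nlinarith [hpow1, hA], ?_⟩
    intro f
    rw [show f + 1 = f + 1 from rfl, loopB_step f b es idx hidx, if_neg hpush]
    rw [tryA_step es.length es b idx _ (by omega), if_neg hpush]
    simp only [Bool.false_eq_true, if_false]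
    rfl

theorem big_fuel_pos : 0 < (18 : Nat) ^ 257 := pow_pos (by norm_num) _

-- ===== VERDICT (by name: the statement is the Claim_ definition above) =====
theorem solve_spec : Claim_equal_solve := by
  intro b _ hpre
  unfold Spec_solve solve solve_alt
  have h1 : (18 : Nat) ^ 257 = (18 ^ 257 - 1) + 1 := by
    have := big_fuel_pos
    omega
  rcases hpre with h16 | hz
  · have hes := emptiesOf_char b h16
    by_cases hE : emptiesOf b = []
    · have hfil : (List.range' 0 256).filter (pz b) = [] := by rw [← hes, hE]
      have hfz : find_empty b = none := by
        rw [find_empty_char b h16]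
        unfold firstZero
        rw [find?_eq_head_filter, hfil]
        rfl
      rw [solveFuel, hfz, hE, h1, loopB_exit _ b [] 0 (by simp)]
      simp
    · have hlen : (b.map fun r => r.count 0).sum = (emptiesOf b).length := count_zeros_eq b h16
      have hn1 : 1 ≤ (emptiesOf b).length := by
        cases h : emptiesOf b with
        | nil => exact absurd h hE
        | cons a l => simp [h]
      have hfil0 : (List.range' 0 256).filter (pz b) = (emptiesOf b).drop 0 := by
        rw [List.drop_zero, hes]
      have hA := keyA ((b.map fun r => r.count 0).sum + 1) b (emptiesOf b) 0 h16 (by omega)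
        hfil0 (by omega)
      rw [if_neg (by omega)] at hA
      have hnd : (emptiesOf b).Nodup := by
        rw [hes]
        exact List.Nodup.filter _ (List.nodup_range' 1)
      have h256 : ∀ p ∈ emptiesOf b, p < 256 := by
        intro p hp
        rw [hes] at hp
        have := List.mem_of_mem_filter hp
        rw [List.mem_range'_1] at this
        omega
      have hz0 : ∀ j, j < (emptiesOf b).length →
          cell2 b ((emptiesOf b).getD j 0 / 16) ((emptiesOf b).getD j 0 % 16) = 0 := by
        intro j hj
        have hmem : (emptiesOf b).getD j 0 ∈ emptiesOf b := by
          rw [List.getD_eq_getElem _ 0 hj]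
          exact List.getElem_mem hj
        rw [hes] at hmem
        have := List.of_mem_filter hmem
        simpa [pz, ← hes] using this
      have hcell0 : cell2 b ((emptiesOf b).getD 0 0 / 16) ((emptiesOf b).getD 0 0 % 16) = 0 :=
        hz0 0 (by omega)
      obtain ⟨k, k', hk', hkb, hloop⟩ := keyB
        (((emptiesOf b).length - 0) * 18 +
          (17 - cell2 b ((emptiesOf b).getD 0 0 / 16) ((emptiesOf b).getD 0 0 % 16)).toNat)
        b (emptiesOf b) 0 h16 hnd h256 (by omega) (fun j _ hj => hz0 j hj)
        (by rw [hcell0]) (by rw [hcell0]; norm_num) le_rfl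
      have hn256 : (emptiesOf b).length ≤ 256 := by
        rw [hes]
        exact le_trans (List.length_filter_le _ _) (by simp)
      have hkbig : k + 1 ≤ 18 ^ 257 := by
        have hA17 : ((17 : Int) - 0).toNat = 17 := by decide
        rw [hcell0, hA17] at hkb
        have hmono : (18 : Nat) ^ ((emptiesOf b).length - 0 - 1) ≤ 18 ^ 255 :=
          Nat.pow_le_pow_right (by norm_num) (by omega)
        have hbig : (18 : Nat) ^ 257 = 324 * 18 ^ 255 := by
          rw [pow_succ, pow_succ]
          ring
        have hpos : 0 < (18 : Nat) ^ 255 := pow_pos (by norm_num) _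
        have hk34 : k ≤ 34 * 18 ^ 255 := by
          refine le_trans hkb ?_
          calc 2 * 17 * 18 ^ ((emptiesOf b).length - 0 - 1) = 34 * 18 ^ ((emptiesOf b).length - 0 - 1) := by ring
            _ ≤ 34 * 18 ^ 255 := Nat.mul_le_mul_left 34 hmono
        omega
      have hrun := hloop (18 ^ 257 - k)
      rw [Nat.sub_add_cancel (by omega), hcell0] at hrun
      push_cast at hrun
      cases hT : tryA (emptiesOf b).length (emptiesOf b) b 0 1 with
      | true =>
        rw [hT] at hA hrun
        rw [if_pos rfl] at hrun
        rw [hA, hrun]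
        rfl
      | false =>
        rw [hT] at hA hrun
        rw [if_neg (by simp)] at hrun
        have h2 : 18 ^ 257 - k + k' = (18 ^ 257 - k + k' - 1) + 1 := by omega
        rw [h2, loopB_exit _ _ _ _ (by norm_num)] at hrun
        rw [hA, hrun]
        have : ((-1 : Int) == ((emptiesOf b).length : Int)) = false := by
          simp only [beq_eq_false_iff_ne, ne_eq]
          intro he
          omega
        rw [this]
        rfl
  · have hE : emptiesOf b = [] := zeroFree_empties b hz
    rw [solveFuel, zeroFree_find_empty b hz, hE, h1, loopB_exit _ b [] 0 (by simp)]
    simp
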